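-- pv_equiv track=rewrite | github.com/k-harada/AtCoder | ADT/20231018/C.py | solve
-- ===== SOURCE A (Python) =====
-- def solve(k, a, b):
--     a_10 = 0
--     b_10 = 0
--     for i, c in enumerate(reversed(str(a))):
--         a_10 += int(c) * (k ** i)
--     for i, c in enumerate(reversed(str(b))):
--         b_10 += int(c) * (k ** i)
--     return a_10 * b_10
-- ===== SOURCE B (Python) =====
-- def solve(k, a, b):
--     def to_dec(n):
--         v = 0
--         for c in str(n):
--             v = v * k + int(c)
--         return v
--     return to_dec(a) * to_dec(b)
-- ===== Notes on version B (the rewrite author's own statement) =====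
-- stated objective: simpler
-- what changed: Replaces the two indexed sums of digit*k**i over reversed digit strings by a single-accumulator Horner pass left-to-right (v = v*k + digit), factored into one helper; no powers are built.
import Mathlib
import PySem

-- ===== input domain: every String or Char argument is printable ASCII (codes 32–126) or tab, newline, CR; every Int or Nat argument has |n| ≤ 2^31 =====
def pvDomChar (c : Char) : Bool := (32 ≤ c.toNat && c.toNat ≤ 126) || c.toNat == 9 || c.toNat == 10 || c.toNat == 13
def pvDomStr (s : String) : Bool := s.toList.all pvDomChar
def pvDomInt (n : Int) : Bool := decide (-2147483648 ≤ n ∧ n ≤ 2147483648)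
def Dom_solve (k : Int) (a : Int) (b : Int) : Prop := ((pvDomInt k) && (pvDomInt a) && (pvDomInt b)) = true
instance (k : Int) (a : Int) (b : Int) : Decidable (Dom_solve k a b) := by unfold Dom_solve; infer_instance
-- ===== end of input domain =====

-- B converts each number with a single left-to-right Horner pass (v = v*k + digit) instead of
-- A's indexed sums of digit * k**i over the reversed digit strings; simpler, same results.


-- ===== PORT A =====
-- int(c) for a single digit character '0'..'9' (exact there; Pre_ guarantees only digits occur)
def pyDigit (c : Char) : Int := (c.toNat : Int) - 48

def solve (k : Int) (a : Int) (b : Int) : Int :=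
  let a10 := (PySem.List.enumerate ((PySem.Int.toChars a).reverse) 0).foldl
    (fun acc p => acc + pyDigit p.2 * k ^ p.1.toNat) 0
  let b10 := (PySem.List.enumerate ((PySem.Int.toChars b).reverse) 0).foldl
    (fun acc p => acc + pyDigit p.2 * k ^ p.1.toNat) 0
  a10 * b10

-- ===== PORT B =====
def toDec (k : Int) (n : Int) : Int :=
  (PySem.Int.toChars n).foldl (fun v c => v * k + pyDigit c) 0

def solve_alt (k : Int) (a : Int) (b : Int) : Int :=
  toDec k a * toDec k b

-- ===== PRECONDITION & SPEC =====
-- Pre_ excludes negative a or b: there str(n) starts with '-' and both Pythons raise ValueError at int('-').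
def Pre_solve (k : Int) (a : Int) (b : Int) : Prop := 0 ≤ a ∧ 0 ≤ b
instance (k : Int) (a : Int) (b : Int) : Decidable (Pre_solve k a b) := by unfold Pre_solve; infer_instance
def pvWitness_solve : Int × Int × Int := (2, 10, 3)

def Spec_solve (k : Int) (a : Int) (b : Int) (out : Int) : Prop := out = solve_alt k a b
instance (k : Int) (a : Int) (b : Int) (out : Int) : Decidable (Spec_solve k a b out) := by unfold Spec_solve; infer_instance

-- ===== CLAIM (what is proved, stated in full; the proofs are below) =====
def Claim_equal_solve : Prop := ∀ (k : Int) (a : Int) (b : Int), Dom_solve k a b → Pre_solve k a b → Spec_solve k a b (solve k a b)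

-- ===== LEMMAS AND PROOFS =====

-- value of a digit list, least-significant digit first
def digVal (k : Int) : List Char → Int
  | [] => 0
  | c :: r => pyDigit c + k * digVal k r

theorem digVal_append (k : Int) (r : List Char) (c : Char) :
    digVal k (r ++ [c]) = digVal k r + pyDigit c * k ^ r.length := by
  induction r with
  | nil => simp [digVal]
  | cons x t ih => simp [digVal, ih, pow_succ]; ring

theorem horner_eq (k : Int) (l : List Char) (x : Int) :
    l.foldl (fun v c => v * k + pyDigit c) x = x * k ^ l.length + digVal k l.reverse := by
  induction l generalizing x with
  | nil => simp [digVal]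
  | cons c t ih =>
    simp only [List.foldl_cons, ih, List.reverse_cons, digVal_append, List.length_reverse,
      List.length_cons, pow_succ]
    ring

theorem enum_sum_eq (k : Int) (r : List Char) (s : Nat) (x : Int) :
    (PySem.List.enumerate r (s : Int)).foldl
      (fun acc p => acc + pyDigit p.2 * k ^ p.1.toNat) x
    = x + k ^ s * digVal k r := by
  induction r generalizing s x with
  | nil => simp [PySem.List.enumerate_nil, digVal]
  | cons c t ih =>
    have h1 : ((s : Int) + 1) = ((s + 1 : Nat) : Int) := by push_cast; ring
    simp only [PySem.List.enumerate_cons, List.foldl_cons, h1, ih, Int.toNat_natCast, digVal,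
      pow_succ]
    ring

theorem conv_eq (k n : Int) :
    (PySem.List.enumerate ((PySem.Int.toChars n).reverse) 0).foldl
      (fun acc p => acc + pyDigit p.2 * k ^ p.1.toNat) 0 = toDec k n := by
  have h0 : (0 : Int) = ((0 : Nat) : Int) := rfl
  rw [toDec, horner_eq, h0, enum_sum_eq]
  simp

-- ===== VERDICT (by name: the statement is the Claim_ definition above) =====
theorem solve_spec : Claim_equal_solve := by
  intro k a b _ _
  show solve k a b = solve_alt k a b
  simp only [solve, solve_alt, conv_eq]
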